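-- pv_equiv track=rewrite | github.com/mmakdis/intent-service | modules/intent.py | get_labeled_permutations
-- ===== SOURCE A (Python) =====
-- def get_labeled_permutations(inputs: dict):
--     """_summary_
--
--     Args:
--         inputs (dict): _description_
--
--     Returns:
--         _type_: _description_
--     """
--     permutations = []
--     for label, value_ in inputs.items():
--         for input in value_:
--             permutations.extend(
--                 (input[1], value[0][1])
--                 for _label, value in inputs.items()
--                 if _label != label
--             )
--     return permutations
-- ===== SOURCE B (Python) =====
-- def get_labeled_permutations(inputs: dict):
--     items = list(inputs.items())
--     if not any(v for _, v in items):
--         return []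
--     after = [v[0][1] for _, v in items]
--     before = []
--     out = []
--     for _, vals in items:
--         f0 = after.pop(0)
--         others = before + after
--         out.extend((inp[1], f) for inp in vals for f in others)
--         before.append(f0)
--     return out
-- ===== Notes on version B (the rewrite author's own statement) =====
-- stated objective: alternative
-- what changed: B replaces A's per-item rescan-and-filter of the whole dict by label equality with a single zipper pass that never compares labels: it rotates each label's first value from an 'after' list into a 'before' list, so each label's partner list is before+after purely by position; Pre_ excludes inputs where A raises IndexError (some value list nonempty while another is empty, where B raises too) and association lists with duplicate labels, which cannot arise from a Python dict.
import Mathlib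
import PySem

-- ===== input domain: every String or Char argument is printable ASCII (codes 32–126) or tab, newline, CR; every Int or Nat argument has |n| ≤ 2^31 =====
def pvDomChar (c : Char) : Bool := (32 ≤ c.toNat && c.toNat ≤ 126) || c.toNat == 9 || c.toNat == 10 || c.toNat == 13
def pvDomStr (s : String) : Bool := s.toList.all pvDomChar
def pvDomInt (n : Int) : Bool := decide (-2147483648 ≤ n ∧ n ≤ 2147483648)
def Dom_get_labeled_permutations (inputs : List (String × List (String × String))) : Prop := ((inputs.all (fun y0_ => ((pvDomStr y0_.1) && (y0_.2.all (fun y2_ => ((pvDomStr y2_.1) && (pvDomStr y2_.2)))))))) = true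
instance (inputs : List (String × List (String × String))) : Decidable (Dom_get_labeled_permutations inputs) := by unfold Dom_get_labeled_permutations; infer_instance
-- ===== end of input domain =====

-- B replaces A's per-item rescan of the dict (filtering by label) with a single zipper
-- pass rotating each label's first value from an 'after' to a 'before' list, with no
-- label comparison at all (objective: alternative).

-- ===== PORT A =====
-- value[0][1]: pyGetD with a dummy default — Pre_ guarantees the index is in range whenever the value is used
def get_labeled_permutations (inputs : List (String × List (String × String))) : List (String × String) :=
  inputs.foldl (fun perms lv =>
    lv.2.foldl (fun perms inp =>
      perms ++ ((inputs.filter (fun q => q.1 != lv.1)).map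
        (fun q => (inp.2, (PySem.List.pyGetD q.2 0 ("", "")).2)))) perms) []

-- ===== PORT B =====
-- v[0][1] and after.pop(0) ported as pyGetD with a dummy default — Pre_ guarantees
-- the index is in range whenever the value is used; state = (before, after, out)
def get_labeled_permutations_alt (inputs : List (String × List (String × String))) : List (String × String) :=
  if inputs.all (fun p => p.2.isEmpty) then []   -- 'if not any(v for _, v in items): return []'
  else
    let after0 := inputs.map (fun p => (PySem.List.pyGetD p.2 0 ("", "")).2)
    (inputs.foldl (fun s lv =>
      let f0 := PySem.List.pyGetD s.2.1 0 ""      -- f0 = after.pop(0)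
      let after := s.2.1.drop 1
      let others := s.1 ++ after                   -- others = before + after
      (s.1 ++ [f0], after,
        s.2.2 ++ lv.2.flatMap (fun inp => others.map (fun f => (inp.2, f)))))
      (([] : List String), after0, ([] : List (String × String)))).2.2

-- ===== PRECONDITION & SPEC =====
-- Pre_ excludes (a) inputs where some label's value list is nonempty while another's is
-- empty — there Python A raises IndexError on value[0] (and B raises the same way); and
-- (b) association lists with duplicate labels, which cannot arise from the Python dict argument.
def Pre_get_labeled_permutations (inputs : List (String × List (String × String))) : Prop :=
  inputs.Pairwise (fun a b => a.1 ≠ b.1) ∧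
  ((∀ p ∈ inputs, p.2 = []) ∨ (∀ p ∈ inputs, p.2 ≠ []))
instance (inputs : List (String × List (String × String))) : Decidable (Pre_get_labeled_permutations inputs) := by unfold Pre_get_labeled_permutations; infer_instance
def pvWitness_get_labeled_permutations : (List (String × List (String × String))) :=
  [("a", [("x", "y")]), ("b", [("u", "v")])]

def Spec_get_labeled_permutations (inputs : List (String × List (String × String))) (out : List (String × String)) : Prop := out = get_labeled_permutations_alt inputs
instance (inputs : List (String × List (String × String))) (out : List (String × String)) : Decidable (Spec_get_labeled_permutations inputs out) := by unfold Spec_get_labeled_permutations; infer_instance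

-- ===== CLAIM (what is proved, stated in full; the proofs are below) =====
def Claim_equal_get_labeled_permutations : Prop := ∀ (inputs : List (String × List (String × String))), Dom_get_labeled_permutations inputs → Pre_get_labeled_permutations inputs → Spec_get_labeled_permutations inputs (get_labeled_permutations inputs)

-- ===== LEMMAS AND PROOFS =====

-- proof-side recursive description of B's zipper pass
def pvGoB (before : List String) (rest : List (String × List (String × String))) : List (String × String) :=
  match rest with
  | [] => []
  | lv :: tail =>
    let others := before ++ tail.map (fun p => (PySem.List.pyGetD p.2 0 ("", "")).2)
    (lv.2.flatMap (fun inp => others.map (fun f => (inp.2, f)))) ++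
      pvGoB (before ++ [(PySem.List.pyGetD lv.2 0 ("", "")).2]) tail

-- B's foldl, started from a zipper state, accumulates exactly pvGoB
theorem pvFold_eq (rest pre : List (String × List (String × String)))
    (acc : List (String × String)) :
    (rest.foldl (fun s lv =>
      (s.1 ++ [PySem.List.pyGetD s.2.1 0 ""], s.2.1.drop 1,
        s.2.2 ++ lv.2.flatMap (fun inp => (s.1 ++ s.2.1.drop 1).map (fun f => (inp.2, f)))))
      (pre.map (fun p => (PySem.List.pyGetD p.2 0 ("", "")).2),
       rest.map (fun p => (PySem.List.pyGetD p.2 0 ("", "")).2), acc)).2.2 =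
    acc ++ pvGoB (pre.map (fun p => (PySem.List.pyGetD p.2 0 ("", "")).2)) rest := by
  induction rest generalizing pre acc with
  | nil => simp [pvGoB]
  | cons lv tail ih =>
    rw [List.map_cons, List.foldl_cons, pvGoB]
    have hget : PySem.List.pyGetD
        ((PySem.List.pyGetD lv.2 0 ("", "")).2 :: tail.map (fun p => (PySem.List.pyGetD p.2 0 ("", "")).2)) 0 ""
        = (PySem.List.pyGetD lv.2 0 ("", "")).2 := by
      simp [PySem.List.pyGetD, PySem.List.pyGet?, PySem.List.pyIdx?]
    simp only [hget, List.drop_succ_cons, List.drop_zero]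
    have hpre : pre.map (fun p => (PySem.List.pyGetD p.2 0 ("", "")).2) ++ [(PySem.List.pyGetD lv.2 0 ("", "")).2]
        = (pre ++ [lv]).map (fun p => (PySem.List.pyGetD p.2 0 ("", "")).2) := by
      simp
    rw [hpre]
    rw [ih (pre ++ [lv])]
    simp [List.append_assoc]

-- A, flattened: a flatMap of per-label blocks
theorem pvA_flat (inputs : List (String × List (String × String))) :
    get_labeled_permutations inputs =
      inputs.flatMap (fun lv => lv.2.flatMap (fun inp =>
        (inputs.filter (fun q => q.1 != lv.1)).map
          (fun q => (inp.2, (PySem.List.pyGetD q.2 0 ("", "")).2)))) := by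
  unfold get_labeled_permutations
  have hstep : (fun (perms : List (String × String)) (lv : String × List (String × String)) =>
      lv.2.foldl (fun perms inp =>
        perms ++ ((inputs.filter (fun q => q.1 != lv.1)).map
          (fun q => (inp.2, (PySem.List.pyGetD q.2 0 ("", "")).2)))) perms) =
      (fun (perms : List (String × String)) (lv : String × List (String × String)) => perms ++ lv.2.flatMap (fun inp =>
        (inputs.filter (fun q => q.1 != lv.1)).map
          (fun q => (inp.2, (PySem.List.pyGetD q.2 0 ("", "")).2))) ) := by
    funext perms lv
    exact PySem.List.foldl_append_eq_flatMap _ _ _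
  rw [hstep, PySem.List.foldl_append_eq_flatMap]
  simp

-- with pairwise-distinct labels, A's filter on the head label of the suffix is positional
theorem pvFilter_split (pre tail : List (String × List (String × String)))
    (lv : String × List (String × String))
    (hpw : (pre ++ lv :: tail).Pairwise (fun a b => a.1 ≠ b.1)) :
    (pre ++ lv :: tail).filter (fun q => q.1 != lv.1) = pre ++ tail := by
  rw [List.pairwise_append] at hpw
  obtain ⟨hpre, htl, hcross⟩ := hpw
  rw [List.pairwise_cons] at htl
  rw [List.filter_append, List.filter_cons]
  have hself : (lv.1 != lv.1) = false := by simp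
  rw [hself]
  simp only [Bool.false_eq_true, if_false]
  congr 1
  · exact List.filter_eq_self.mpr (fun b hb => by
      simpa [bne_iff_ne] using hcross b hb lv List.mem_cons_self)
  · exact List.filter_eq_self.mpr (fun b hb => by
      simpa [bne_iff_ne] using (htl.1 b hb).symm)

-- invariant of B's zipper recursion: with 'before' = first values of the prefix,
-- go produces exactly A's blocks for the suffix
theorem pvGo_eq (inputs pre rest : List (String × List (String × String)))
    (hpw : inputs.Pairwise (fun a b => a.1 ≠ b.1))
    (heq : inputs = pre ++ rest) :
    pvGoB (pre.map (fun p => (PySem.List.pyGetD p.2 0 ("", "")).2)) rest =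
      rest.flatMap (fun lv => lv.2.flatMap (fun inp =>
        (inputs.filter (fun q => q.1 != lv.1)).map
          (fun q => (inp.2, (PySem.List.pyGetD q.2 0 ("", "")).2)))) := by
  induction rest generalizing pre with
  | nil => rfl
  | cons lv tail ih =>
    rw [pvGoB, List.flatMap_cons]
    have hfil : inputs.filter (fun q => q.1 != lv.1) = pre ++ tail := by
      rw [heq]; exact pvFilter_split pre tail lv (heq ▸ hpw)
    congr 1
    · -- head block
      rw [hfil]
      apply List.flatMap_congr
      intro inp _
      rw [List.map_append, List.map_append, List.map_map, List.map_map]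
      rfl
    · -- recursive call, with pre' = pre ++ [lv]
      have := ih (pre ++ [lv]) (by rw [heq, List.append_assoc]; rfl)
      simpa using this

-- ===== VERDICT (by name: the statement is the Claim_ definition above) =====
theorem get_labeled_permutations_spec : Claim_equal_get_labeled_permutations := by
  intro inputs _dom hpre
  unfold Spec_get_labeled_permutations
  rcases hpre with ⟨hpw, hcase⟩
  unfold get_labeled_permutations_alt
  rcases hcase with hemp | hne
  · -- every value list empty: both sides are []
    have hguard : inputs.all (fun p => p.2.isEmpty) = true :=
      List.all_eq_true.mpr (fun p hp => by simp [hemp p hp])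
    rw [hguard, if_pos rfl, pvA_flat]
    apply List.flatMap_eq_nil_iff.mpr
    intro lv hlv
    rw [hemp lv hlv]
    rfl
  · cases inputs with
    | nil => rfl
    | cons x xs =>
      have hguard : (x :: xs).all (fun p => p.2.isEmpty) = false :=
        List.all_eq_false.mpr ⟨x, List.mem_cons_self, by
          simpa using hne x List.mem_cons_self⟩
      rw [hguard]
      simp only [Bool.false_eq_true, if_false]
      rw [pvA_flat]
      have h := pvFold_eq (x :: xs) [] []
      simp only [List.map_nil, List.nil_append] at h
      rw [h]
      exact (pvGo_eq (x :: xs) [] (x :: xs) hpw rfl).symm
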